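-- pv_equiv track=rewrite | github.com/havegrit/Algorithm | 프로그래머스/0/120863. 다항식 더하기/다항식 더하기.py | solution
-- ===== SOURCE A (Python) =====
-- def solution(polynomial):
--     answer = '0'
--     sumXCofficients = 0
--     sumConstants = 0
--     for element in polynomial.split(' '):
--         if element == '+':
--             continue
--
--         if element.endswith('x'):
--             xCofficient = element[:element.index('x')]
--
--             if xCofficient == '':
--                 sumXCofficients += 1
--             else:
--                 sumXCofficients += int(xCofficient)
--         else:
--             sumConstants += int(element)
--
--     if sumXCofficients != 0 and sumConstants != 0:
--         if sumXCofficients == 1: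
--             return 'x + ' + str(sumConstants)
--         return str(sumXCofficients) + 'x + ' + str(sumConstants)
--     elif sumXCofficients == 0 and sumConstants != 0:
--         return str(sumConstants)
--     elif sumXCofficients != 0 and sumConstants == 0:
--         if sumXCofficients == 1:
--             return 'x'
--         return str(sumXCofficients) + 'x'
--
--     return answer
-- ===== SOURCE B (Python) =====
-- def solution(polynomial):
--     coeff = 0
--     const = 0
--     cur = ''
--     for ch in polynomial + ' ':
--         if ch != ' ':
--             cur += ch
--             continue
--         tok, cur = cur, ''
--         if tok == '+':
--             continue
--         k = tok.find('x')
--         if k < 0: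
--             const += int(tok)
--         elif k == 0:
--             coeff += 1
--         else:
--             coeff += int(tok[:k])
--     parts = []
--     if coeff:
--         parts.append('x' if coeff == 1 else str(coeff) + 'x')
--     if const:
--         parts.append(str(const))
--     return ' + '.join(parts) or '0'
-- ===== Notes on version B (the rewrite author's own statement) =====
-- stated objective: alternative
-- what changed: A's space-split plus endswith-x plus slice-and-reclassify loop with a four-way if/elif output cascade is replaced by a sentinel-terminated character-level scan that builds tokens in a buffer (no split call), dispatches each token on the position of its first letter x (absent / leading / interior) instead of an endswith test, and formats by collecting term strings and joining them.
import Mathlib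
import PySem

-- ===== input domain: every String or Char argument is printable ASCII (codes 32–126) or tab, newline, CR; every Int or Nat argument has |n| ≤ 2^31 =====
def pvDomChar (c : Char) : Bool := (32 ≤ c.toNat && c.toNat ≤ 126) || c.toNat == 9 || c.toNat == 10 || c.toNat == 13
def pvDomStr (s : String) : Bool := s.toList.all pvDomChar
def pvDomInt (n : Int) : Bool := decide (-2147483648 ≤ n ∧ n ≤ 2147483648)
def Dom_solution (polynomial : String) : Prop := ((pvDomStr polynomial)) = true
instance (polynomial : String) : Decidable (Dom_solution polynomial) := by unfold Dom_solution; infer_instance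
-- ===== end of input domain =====

-- B replaces A's split(' ') + endswith('x') classification + four-way output cascade by a
-- sentinel-terminated character-level scan with a token buffer, a dispatch on the position of
-- the first 'x' in the token, and a collect-parts-and-join formatting (objective: alternative).

-- ===== PORT A =====
-- one loop step of A over the state (sumXCofficients, sumConstants); int() is
-- PySem.Int.ofStr?; element.index('x') is ported as Str.find, which agrees since the
-- endswith guard ensures 'x' occurs; `.getD 0` is only reachable outside Pre_solution
-- (where Python A raises ValueError)
def solAStep (st : Int × Int) (element : String) : Int × Int :=
  if element = "+" then st
  else if PySem.Str.endswith element "x" then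
    let xCof := PySem.Str.slice element none (some (PySem.Str.find element "x"))
    if xCof = "" then (st.1 + 1, st.2)
    else (st.1 + (PySem.Int.ofStr? xCof).getD 0, st.2)
  else (st.1, st.2 + (PySem.Int.ofStr? element).getD 0)

def solution (polynomial : String) : String :=
  let answer := "0"
  let sums := ((PySem.Str.split? polynomial " ").getD []).foldl solAStep (0, 0)
  let sumXCofficients := sums.1
  let sumConstants := sums.2
  if sumXCofficients ≠ 0 ∧ sumConstants ≠ 0 then
    if sumXCofficients = 1 then "x + " ++ PySem.Int.toStr sumConstants
    else PySem.Int.toStr sumXCofficients ++ "x + " ++ PySem.Int.toStr sumConstants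
  else if sumXCofficients = 0 ∧ sumConstants ≠ 0 then PySem.Int.toStr sumConstants
  else if sumXCofficients ≠ 0 ∧ sumConstants = 0 then
    if sumXCofficients = 1 then "x" else PySem.Int.toStr sumXCofficients ++ "x"
  else answer

-- ===== PORT B =====
-- one character of Source B's scan; the state is ((coeff, const), cur), cur the token buffer
-- (a string in Source B, modelled as its List Char); int() is PySem.Int.ofChars?, tok.find('x')
-- is Chars.find, tok[:k] is List.slice; `.getD 0` is only reachable outside Pre_solution
def solBStep (st : (Int × Int) × List Char) (ch : Char) : (Int × Int) × List Char :=
  if ch ≠ ' ' then (st.1, st.2 ++ [ch])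
  else if st.2 = ['+'] then (st.1, [])
  else if PySem.Chars.find st.2 ['x'] < 0 then
    ((st.1.1, st.1.2 + (PySem.Int.ofChars? st.2).getD 0), [])
  else if PySem.Chars.find st.2 ['x'] = 0 then ((st.1.1 + 1, st.1.2), [])
  else
    ((st.1.1 + (PySem.Int.ofChars? (PySem.List.slice st.2 none (some (PySem.Chars.find st.2 ['x'])))).getD 0,
      st.1.2), [])

def solution_alt (polynomial : String) : String :=
  let r := (polynomial.toList ++ [' ']).foldl solBStep ((0, 0), [])
  let coeff := r.1.1
  let const := r.1.2
  let parts :=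
    (if coeff ≠ 0 then
        [if coeff = 1 then "x" else PySem.Int.toStr coeff ++ "x"] else []) ++
    (if const ≠ 0 then [PySem.Int.toStr const] else [])
  let joined := PySem.Str.join " + " parts
  if joined = "" then "0" else joined

-- ===== PRECONDITION & SPEC =====
-- Pre_ excludes exactly the inputs where Python A raises ValueError: every token other than
-- a lone plus sign must either contain the letter x, end with it, and have a prefix before
-- its first occurrence that is empty or parses as a Python int, or else itself parse as an int.
def Pre_solution (polynomial : String) : Prop :=
  ∀ t ∈ (PySem.Str.split? polynomial " ").getD [], t ≠ "+" →
    if 0 ≤ PySem.Str.find t "x" then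
      PySem.Str.endswith t "x" = true ∧
        (let p := PySem.Str.slice t none (some (PySem.Str.find t "x"))
         p = "" ∨ (PySem.Int.ofStr? p).isSome = true)
    else (PySem.Int.ofStr? t).isSome = true
instance (polynomial : String) : Decidable (Pre_solution polynomial) := by
  unfold Pre_solution; infer_instance
def pvWitness_solution : String := "3x + 7"
def Spec_solution (polynomial : String) (out : String) : Prop := out = solution_alt polynomial
instance (polynomial : String) (out : String) : Decidable (Spec_solution polynomial out) := by unfold Spec_solution; infer_instance

-- ===== CLAIM (what is proved, stated in full; the proofs are below) =====
def Claim_equal_solution : Prop := ∀ (polynomial : String), Dom_solution polynomial → Pre_solution polynomial → Spec_solution polynomial (solution polynomial)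

-- ===== LEMMAS AND PROOFS =====

-- the effect of B's scan on one completed token
def pvTokStep (p : Int × Int) (tok : List Char) : Int × Int :=
  if tok = ['+'] then p
  else if PySem.Chars.find tok ['x'] < 0 then
    (p.1, p.2 + (PySem.Int.ofChars? tok).getD 0)
  else if PySem.Chars.find tok ['x'] = 0 then (p.1 + 1, p.2)
  else
    (p.1 + (PySem.Int.ofChars? (PySem.List.slice tok none (some (PySem.Chars.find tok ['x'])))).getD 0,
     p.2)

-- structural splitting of a char list at spaces, with a pending prefix
def pvSplit (pre : List Char) : List Char → List (List Char)
  | [] => [pre]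
  | c :: r => if c = ' ' then pre :: pvSplit [] r else pvSplit (pre ++ [c]) r

theorem solBStep_space (p : Int × Int) (buf : List Char) :
    solBStep (p, buf) ' ' = (pvTokStep p buf, []) := by
  rw [solBStep, if_neg (fun h => h rfl), pvTokStep]
  split_ifs <;> rfl

theorem solBStep_char (p : Int × Int) (buf : List Char) (c : Char) (h : c ≠ ' ') :
    solBStep (p, buf) c = (p, buf ++ [c]) := by
  simp only [solBStep, if_pos h]

-- B's scan over cs + sentinel space, started with pending buffer buf, is the token fold
theorem solB_scan (cs : List Char) : ∀ (p : Int × Int) (buf : List Char),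
    (cs ++ [' ']).foldl solBStep (p, buf) = ((pvSplit buf cs).foldl pvTokStep p, []) := by
  induction cs with
  | nil => intro p buf; simp [pvSplit, solBStep_space]
  | cons c r ih =>
    intro p buf
    by_cases hc : c = ' '
    · subst hc
      rw [List.cons_append, List.foldl_cons, solBStep_space, ih]
      simp [pvSplit]
    · simp only [List.cons_append, List.foldl_cons, solBStep_char p buf c hc, pvSplit,
        if_neg hc, ih]

-- PySem's fueled space-split is pvSplit
theorem pvGo : ∀ (fuel : Nat) (l cur : List Char) (acc : List (List Char)),
    l.length < fuel →
    PySem.Chars.splitOn.go [' '] fuel l cur acc = acc.reverse ++ pvSplit cur.reverse l := by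
  intro fuel
  induction fuel with
  | zero => intro l cur acc h; exact absurd h (Nat.not_lt_zero _)
  | succ n ih =>
    intro l cur acc h
    cases l with
    | nil => simp [PySem.Chars.splitOn.go, pvSplit]
    | cons c rest =>
      rw [PySem.Chars.splitOn.go]
      by_cases hc : c = ' '
      · subst hc
        have : ([' '].isPrefixOf (' ' :: rest)) = true := by simp [List.isPrefixOf]
        rw [if_pos this]
        simp only [List.length_cons] at h
        rw [ih _ _ _ (by simpa using Nat.lt_of_succ_lt_succ h)]
        simp [pvSplit]
      · have : ([' '].isPrefixOf (c :: rest)) = false := by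
          simp [List.isPrefixOf]; exact fun hh => hc hh.symm
        rw [if_neg (by simp [this])]
        simp only [List.length_cons] at h
        rw [ih _ _ _ (Nat.lt_of_succ_lt_succ h)]
        simp [pvSplit, if_neg hc]

theorem tokens_eq (s : String) :
    (PySem.Str.split? s " ").getD [] = (pvSplit [] s.toList).map String.ofList := by
  have h1 : PySem.Chars.split? s.toList [' '] = some (PySem.Chars.splitOn s.toList [' ']) := by
    simp [PySem.Chars.split?]
  have h2 : PySem.Chars.splitOn s.toList [' '] = pvSplit [] s.toList := by
    unfold PySem.Chars.splitOn
    simpa using pvGo (s.toList.length + 1) s.toList [] [] (Nat.lt_succ_self _)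
  simp [PySem.Str.split?, h1, h2]

-- per token: A's step on the token string equals B's scan effect, given the Pre_ condition
theorem tok_eq (l : List Char)
    (h : String.ofList l ≠ "+" →
      0 ≤ PySem.Str.find (String.ofList l) "x" →
        PySem.Str.endswith (String.ofList l) "x" = true) (p : Int × Int) :
    solAStep p (String.ofList l) = pvTokStep p l := by
  have htl : (String.ofList l).toList = l := by simp
  by_cases hp : l = ['+']
  · subst hp
    simp [solAStep, pvTokStep]
  · have hps : String.ofList l ≠ "+" := by
      intro hh; apply hp
      have := congrArg String.toList hh
      rw [htl] at this; simpa using this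
    have hfind : PySem.Str.find (String.ofList l) "x" = PySem.Chars.find l ['x'] := by
      simp [PySem.Str.find, htl]
    rw [solAStep, if_neg hps, pvTokStep, if_neg hp]
    by_cases hk : PySem.Chars.find l ['x'] < 0
    · -- no 'x' in the token: A's endswith test is false
      have hend : PySem.Chars.endswith l ['x'] = false := by
        by_contra hc
        have he : PySem.Chars.endswith l ['x'] = true := by
          cases hb : PySem.Chars.endswith l ['x'] with
          | false => exact absurd hb hc
          | true => rfl
        have hsfx : ['x'] <:+ l := (PySem.Chars.endswith_iff l ['x']).mp he
        have : (0 : Int) ≤ PySem.Chars.find l ['x'] :=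
          (PySem.Chars.find_nonneg_iff l ['x']).mpr hsfx.isInfix
        omega
      rw [if_neg (by simp [PySem.Str.endswith, htl, hend]), if_pos hk]
      simp [PySem.Int.ofStr?, htl]
    · -- the token contains 'x': Pre_ gives endswith, so A takes the coefficient branch
      have hk0 : (0 : Int) ≤ PySem.Chars.find l ['x'] := by omega
      have hend := h hps (by rw [hfind]; exact hk0)
      rw [if_pos hend, if_neg hk]
      have hslice : (PySem.Str.slice (String.ofList l) none
          (some (PySem.Str.find (String.ofList l) "x"))).toList
          = PySem.List.slice l none (some (PySem.Chars.find l ['x'])) := by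
        simp [PySem.Str.slice, htl]
      by_cases hz : PySem.Chars.find l ['x'] = 0
      · rw [if_pos hz]
        have h0 : PySem.List.slice l none (some (PySem.Chars.find l ['x'])) = [] := by
          rw [PySem.List.slice_to l hk0, hz]; simp
        have hpe : PySem.Str.slice (String.ofList l) none
            (some (PySem.Str.find (String.ofList l) "x")) = "" :=
          String.toList_inj.mp (by rw [hslice, h0]; rfl)
        rw [if_pos hpe]
      · rw [if_neg hz]
        have hinf : ['x'] <:+: l := (PySem.Chars.find_nonneg_iff l ['x']).mp hk0
        have hlnil : l ≠ [] := by
          intro he; subst he; simp at hinf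
        have hpos : 0 < (PySem.Chars.find l ['x']).toNat := by omega
        have hne : PySem.Str.slice (String.ofList l) none
            (some (PySem.Str.find (String.ofList l) "x")) ≠ "" := by
          intro he
          have : PySem.List.slice l none (some (PySem.Chars.find l ['x'])) = [] := by
            rw [← hslice, he]; rfl
          rw [PySem.List.slice_to l hk0] at this
          rcases List.take_eq_nil_iff.mp this with h1 | h1
          · omega
          · exact hlnil h1
        rw [if_neg hne]
        simp only [PySem.Int.ofStr?, hslice]

theorem toStr_ne_empty (n : Int) : PySem.Int.toStr n ≠ "" := by
  intro h
  have h2 : (PySem.Int.toStr n).toList = [] := by rw [h]; rfl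
  rw [PySem.Int.toList_toStr] at h2
  have : PySem.Int.toChars n ≠ [] := by
    unfold PySem.Int.toChars
    split
    · simp
    · exact List.ne_nil_of_length_pos Nat.length_toDigits_pos
  exact this h2

theorem append_x_ne_empty (s : String) : s ++ "x" ≠ "" := by
  intro h
  have h2 : (s ++ "x").toList = [] := by rw [h]; rfl
  simp at h2

theorem join_one (a : String) : PySem.Str.join " + " [a] = a := by
  apply String.toList_inj.mp
  simp [PySem.Str.toList_join, PySem.Chars.join_singleton]

theorem join_two (a b : String) :
    PySem.Str.join " + " [a, b] = (a ++ " + ") ++ b := by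
  apply String.toList_inj.mp
  simp [PySem.Str.toList_join, PySem.Chars.join_cons_cons, PySem.Chars.join_singleton]

-- A's four-way cascade equals B's build-parts-and-join formatting, for any sums
theorem fmt_eq (c k : Int) :
    (if c ≠ 0 ∧ k ≠ 0 then
        if c = 1 then "x + " ++ PySem.Int.toStr k
        else PySem.Int.toStr c ++ "x + " ++ PySem.Int.toStr k
      else if c = 0 ∧ k ≠ 0 then PySem.Int.toStr k
      else if c ≠ 0 ∧ k = 0 then
        if c = 1 then "x" else PySem.Int.toStr c ++ "x"
      else "0")
    = (if PySem.Str.join " + "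
            ((if c ≠ 0 then [if c = 1 then "x" else PySem.Int.toStr c ++ "x"] else []) ++
              (if k ≠ 0 then [PySem.Int.toStr k] else [])) = "" then "0"
        else PySem.Str.join " + "
            ((if c ≠ 0 then [if c = 1 then "x" else PySem.Int.toStr c ++ "x"] else []) ++
              (if k ≠ 0 then [PySem.Int.toStr k] else []))) := by
  by_cases h1 : c = 0 <;> by_cases h2 : k = 0
  · rw [if_neg (fun h => h.1 h1), if_neg (fun h => h.2 h2), if_neg (fun h => h.1 h1),
      if_neg (not_not_intro h1), if_neg (not_not_intro h2)]
    rfl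
  · rw [if_neg (fun h => h.1 h1), if_pos ⟨h1, h2⟩, if_neg (not_not_intro h1), if_pos h2,
      List.nil_append, join_one, if_neg (toStr_ne_empty k)]
  · rw [if_neg (fun h => h.2 h2), if_neg (fun h => h1 h.1), if_pos ⟨h1, h2⟩, if_pos h1,
      if_neg (not_not_intro h2), List.append_nil, join_one]
    by_cases h3 : c = 1
    · rw [if_pos h3, if_neg (by decide : ¬ ("x" : String) = "")]
    · rw [if_neg h3, if_neg (append_x_ne_empty _)]
  · rw [if_pos ⟨h1, h2⟩, if_pos h1, if_pos h2, List.singleton_append, join_two]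
    by_cases h3 : c = 1
    · rw [if_pos h3,
        if_neg (by intro h; have := congrArg String.toList h; simp at this)]
      apply String.toList_inj.mp
      simp [h3]
    · rw [if_neg h3,
        if_neg (by intro h; have := congrArg String.toList h; simp at this)]
      apply String.toList_inj.mp
      simp [h3]

-- ===== VERDICT (by name: the statement is the Claim_ definition above) =====
theorem solution_spec : Claim_equal_solution := by
  intro s _ hpre
  unfold Pre_solution at hpre
  rw [tokens_eq s] at hpre
  unfold Spec_solution solution solution_alt
  rw [tokens_eq s, solB_scan s.toList (0, 0) [], List.foldl_map]
  have hfold :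
      (pvSplit [] s.toList).foldl (fun st t => solAStep st (String.ofList t)) (0, 0)
        = (pvSplit [] s.toList).foldl pvTokStep (0, 0) := by
    apply PySem.List.foldl_congr_mem
    intro acc x hx
    apply tok_eq
    intro hne hfindpos
    have := hpre (String.ofList x) (List.mem_map_of_mem hx) hne
    rw [if_pos hfindpos] at this
    exact this.1
  rw [hfold]
  exact fmt_eq _ _
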